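-- pv_equiv track=rewrite | github.com/puzzlemoondev/pndl | src/pndl/crawler.py | _partition_directories
-- ===== SOURCE A (Python) =====
-- from itertools import groupby
--
-- def _partition_directories(paths: iter):
--     directories = []
--     files = []
--
--     for is_directory, group in groupby(paths, lambda x: x.endswith('/')):
--         if is_directory:
--             directories.extend(filter(lambda x: x != '../', group))
--         else:
--             files.extend(group)
--
--     return directories, files
-- ===== SOURCE B (Python) =====
-- def _partition_directories(paths: iter):
--     xs = list(paths)
--     directories = [x for x in xs if x.endswith('/') and x != '../']
--     files = [x for x in xs if not x.endswith('/')]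
--     return directories, files
-- ===== Notes on version B (the rewrite author's own statement) =====
-- stated objective: simpler
-- what changed: Replaces the groupby-driven single grouped pass (with per-group extend/filter) by materializing the iterator once and building directories and files with two independent filtered comprehensions.
import Mathlib
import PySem

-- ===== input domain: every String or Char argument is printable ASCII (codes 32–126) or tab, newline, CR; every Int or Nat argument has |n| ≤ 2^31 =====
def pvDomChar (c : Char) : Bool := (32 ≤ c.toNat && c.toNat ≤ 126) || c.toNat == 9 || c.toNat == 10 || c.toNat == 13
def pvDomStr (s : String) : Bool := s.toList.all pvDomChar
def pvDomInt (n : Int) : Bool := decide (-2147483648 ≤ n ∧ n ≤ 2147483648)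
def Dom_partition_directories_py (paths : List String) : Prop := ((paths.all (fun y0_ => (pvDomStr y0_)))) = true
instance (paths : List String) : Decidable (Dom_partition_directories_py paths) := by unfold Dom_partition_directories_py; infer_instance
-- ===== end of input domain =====

-- B replaces A's groupby-driven grouped pass by two independent filtered passes (objective: simpler).

-- ===== PORT A =====
-- itertools.groupby(paths, key): the maximal runs of equal key values, as (key, group) pairs
def pvRuns (p : String → Bool) : List String → List (Bool × List String)
  | [] => []
  | x :: xs =>
    match pvRuns p xs with
    | [] => [(p x, [x])]
    | (k, g) :: rest => if p x = k then (k, x :: g) :: rest else (p x, [x]) :: (k, g) :: rest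

-- body of A's for-loop: extend directories (filtering '../') or files with the group
def pvStepA (acc : List String × List String) (kg : Bool × List String) : List String × List String :=
  if kg.1 then (acc.1 ++ kg.2.filter (fun x => x != "../"), acc.2)
  else (acc.1, acc.2 ++ kg.2)

def partition_directories_py (paths : List String) : List String × List String :=
  List.foldl pvStepA ([], []) (pvRuns (fun x => PySem.Str.endswith x "/") paths)

-- ===== PORT B =====
def partition_directories_py_alt (paths : List String) : List String × List String :=
  (paths.filter (fun x => PySem.Str.endswith x "/" && x != "../"),
   paths.filter (fun x => !PySem.Str.endswith x "/"))

-- ===== PRECONDITION & SPEC =====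
def Spec_partition_directories_py (paths : List String) (out : List String × List String) : Prop := out = partition_directories_py_alt paths
instance (paths : List String) (out : List String × List String) : Decidable (Spec_partition_directories_py paths out) := by unfold Spec_partition_directories_py; infer_instance

-- ===== CLAIM (what is proved, stated in full; the proofs are below) =====
def Claim_equal_partition_directories_py : Prop := ∀ (paths : List String), Dom_partition_directories_py paths → Spec_partition_directories_py paths (partition_directories_py paths)

-- ===== LEMMAS AND PROOFS =====

lemma pvRuns_eq_nil (p : String → Bool) (xs : List String) (h : pvRuns p xs = []) : xs = [] := by
  cases xs with
  | nil => rfl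
  | cons x t =>
    exfalso
    cases h' : pvRuns p t with
    | nil => simp [pvRuns, h'] at h
    | cons kg rest =>
      obtain ⟨k, g⟩ := kg
      by_cases hp : p x = k <;> simp [pvRuns, h', hp] at h

lemma pvStepA_group_cons (d f g : List String) (k : Bool) (x : String) :
    pvStepA (d, f) (k, x :: g) =
      pvStepA (if k then (d ++ (if (x != "../") = true then [x] else []), f) else (d, f ++ [x])) (k, g) := by
  cases k <;> cases hne : (x != "../") <;> simp [pvStepA, hne]

lemma pvRuns_foldl (p : String → Bool) (xs : List String) : ∀ d f : List String,
    List.foldl pvStepA (d, f) (pvRuns p xs) =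
      (d ++ xs.filter (fun x => p x && x != "../"), f ++ xs.filter (fun x => !p x)) := by
  induction xs with
  | nil => intro d f; simp [pvRuns]
  | cons x t ih =>
    intro d f
    cases hr : pvRuns p t with
    | nil =>
      have ht : t = [] := pvRuns_eq_nil p t hr
      subst ht
      cases hpx : p x <;> cases hne : (x != "../") <;>
        simp [pvRuns, pvStepA, hpx, hne]
    | cons kg rest =>
      obtain ⟨k, g⟩ := kg
      have ih' : ∀ d f : List String,
          List.foldl pvStepA (d, f) ((k, g) :: rest) =
            (d ++ t.filter (fun x => p x && x != "../"), f ++ t.filter (fun x => !p x)) := by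
        intro d f; rw [← hr]; exact ih d f
      by_cases hpx : p x = k
      · subst hpx
        have hrx : pvRuns p (x :: t) = (p x, x :: g) :: rest := by
          simp [pvRuns, hr]
        rw [hrx, List.foldl_cons, pvStepA_group_cons, ← List.foldl_cons]
        cases hpk : p x with
        | true =>
          rw [hpk] at ih'
          rw [if_pos rfl, ih']
          cases hne : (x != "../") <;> simp [hpk, hne]
        | false =>
          rw [hpk] at ih'
          rw [if_neg (by simp), ih']
          simp [hpk]
      · have hrx : pvRuns p (x :: t) = (p x, [x]) :: (k, g) :: rest := by
          simp [pvRuns, hr, hpx]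
        rw [hrx, List.foldl_cons]
        cases hpk : p x with
        | true =>
          have hstep : pvStepA (d, f) (true, [x]) = (d ++ (if (x != "../") = true then [x] else []), f) := by
            cases hne : (x != "../") <;> simp [pvStepA, hne]
          rw [hstep, ih']
          cases hne : (x != "../") <;> simp [hpk, hne]
        | false =>
          have hstep : pvStepA (d, f) (false, [x]) = (d, f ++ [x]) := by simp [pvStepA]
          rw [hstep, ih']
          simp [hpk]

-- ===== VERDICT (by name: the statement is the Claim_ definition above) =====
theorem partition_directories_py_spec : Claim_equal_partition_directories_py := by
  intro paths _
  unfold Spec_partition_directories_py partition_directories_py partition_directories_py_alt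
  rw [pvRuns_foldl]
  simp
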